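-- pv_equiv track=rewrite | github.com/spacebat/token-savior | src/token_savior/brace_matcher.py | _csharp_skip_verbatim_string
-- ===== SOURCE A (Python) =====
-- def _csharp_skip_verbatim_string(
--     lines: list[str], idx: int, i: int
-- ) -> tuple[int, int]:
--     """Consume a verbatim ``@"..."`` body starting past the opening ``"``.
--
--     Supports ``""`` as an escaped quote and multi-line bodies. Returns
--     ``(idx, i)`` after the closing quote, or ``(len(lines), 0)`` as an
--     EOF sentinel if unclosed.
--     """
--     while idx < len(lines):
--         line = lines[idx]
--         while i < len(line):
--             if line[i] == '"':
--                 if i + 1 < len(line) and line[i + 1] == '"':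
--                     i += 2
--                     continue
--                 return idx, i + 1
--             i += 1
--         idx += 1
--         i = 0
--     return len(lines), 0
-- ===== SOURCE B (Python) =====
-- def _rle(s):
--     """Run-length encode s: list of (char, run_length) for maximal runs."""
--     runs = []
--     j = 0
--     n = len(s)
--     while j < n:
--         q = j + 1
--         while q < n and s[q] == s[j]:
--             q += 1
--         runs.append((s[j], q - j))
--         j = q
--     return runs
--
--
-- def _csharp_skip_verbatim_string(
--     lines: list[str], idx: int, i: int
-- ) -> tuple[int, int]:
--     """Run-length/parity reformulation: a maximal run of k consecutive '"'
--     consumes k//2 escaped pairs, so the body closes exactly at the end of the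
--     first odd-length quote run; even runs and other characters are skipped."""
--     while idx < len(lines):
--         pos = i
--         for ch, cnt in _rle(lines[idx][i:]):
--             if ch == '"' and cnt % 2 == 1:
--                 return idx, pos + cnt
--             pos += cnt
--         idx += 1
--         i = 0
--     return len(lines), 0
-- ===== Notes on version B (the rewrite author's own statement) =====
-- stated objective: alternative
-- what changed: A's stateful char-by-char scan with one-character lookahead pairing of '""' escapes is replaced by a two-stage algorithm: run-length encode each line tail, then the body closes exactly at the end of the first odd-length run of quotes (even quote runs are fully escaped pairs), so no lookahead or pairing logic remains.
-- outside the precondition, e.g. on _csharp_skip_verbatim_string(['"a'], 0, -1): A returns (0, 1), B returns (1, 0); on _csharp_skip_verbatim_string(['ab'], 0, -3): A raises IndexError, B returns (1, 0); on _csharp_skip_verbatim_string(['a'], -5, 0): A raises IndexError, B raises IndexError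
import Mathlib
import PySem

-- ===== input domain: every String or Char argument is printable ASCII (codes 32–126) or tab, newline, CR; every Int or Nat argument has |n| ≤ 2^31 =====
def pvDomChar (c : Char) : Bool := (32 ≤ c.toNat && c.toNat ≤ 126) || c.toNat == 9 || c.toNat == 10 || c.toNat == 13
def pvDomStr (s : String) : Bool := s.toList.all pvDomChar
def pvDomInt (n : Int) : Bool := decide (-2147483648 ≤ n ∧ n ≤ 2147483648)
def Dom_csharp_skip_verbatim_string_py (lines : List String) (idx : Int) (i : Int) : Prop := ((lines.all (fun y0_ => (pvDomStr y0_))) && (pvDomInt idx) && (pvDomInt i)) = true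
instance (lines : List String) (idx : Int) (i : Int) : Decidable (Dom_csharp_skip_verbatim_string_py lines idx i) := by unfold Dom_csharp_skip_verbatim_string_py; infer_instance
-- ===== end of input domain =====

-- B replaces A's char-by-char scan with lookahead pairing by run-length encoding each line tail and
-- closing at the end of the first odd-length quote run (alternative decomposition, same cost);
-- equivalence is proved on A's natural domain of positions (Pre_ below).


-- ===== PORT A =====
-- A's inner `while i < len(line)` loop: step one character at a time, pairing '""' by lookahead.
def pvInnerA (s : List Char) (i : Int) : Option Int :=
  if _h : i < (s.length : Int) then
    match PySem.List.pyGet? s i with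
    | none => none   -- line[i] would raise IndexError; unreachable inside Pre_
    | some c =>
      if c = '"' then
        if i + 1 < (s.length : Int) ∧ PySem.List.pyGet? s (i + 1) = some '"' then
          pvInnerA s (i + 2)
        else some (i + 1)
      else pvInnerA s (i + 1)
  else none
termination_by ((s.length : Int) - i).toNat
decreasing_by all_goals omega

def csharp_skip_verbatim_string_py (lines : List String) (idx : Int) (i : Int) : Int × Int :=
  if _h : idx < (lines.length : Int) then
    match PySem.List.pyGet? lines idx with
    | none => ((lines.length : Int), 0)   -- lines[idx] would raise IndexError; unreachable inside Pre_
    | some line =>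
      match pvInnerA line.toList i with
      | some j => (idx, j)
      | none => csharp_skip_verbatim_string_py lines (idx + 1) 0
  else ((lines.length : Int), 0)
termination_by ((lines.length : Int) - idx).toNat
decreasing_by omega

-- ===== PORT B =====
-- Source B's inner `while q < n and s[q] == s[j]` loop: length of the maximal run of c at the front of t.
def pvSpan (c : Char) : List Char → Nat
  | [] => 0
  | a :: t => if a = c then pvSpan c t + 1 else 0

-- Source B's `_rle`: run-length encoding, outer `while j < n` loop.
def pvRle : List Char → List (Char × Nat)
  | [] => []
  | c :: t => (c, pvSpan c t + 1) :: pvRle (t.drop (pvSpan c t))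
termination_by l => l.length
decreasing_by simp [List.length_drop]

-- Source B's `for ch, cnt in runs` loop with the `pos` accumulator and early return.
def pvScan : List (Char × Nat) → Int → Option Int
  | [], _ => none
  | (c, n) :: rest, pos =>
      if c = '"' ∧ n % 2 = 1 then some (pos + (n : Int)) else pvScan rest (pos + (n : Int))

def csharp_skip_verbatim_string_py_alt (lines : List String) (idx : Int) (i : Int) : Int × Int :=
  if _h : idx < (lines.length : Int) then
    match PySem.List.pyGet? lines idx with
    | none => ((lines.length : Int), 0)   -- lines[idx] would raise IndexError; unreachable inside Pre_
    | some line =>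
      match pvScan (pvRle (PySem.List.slice line.toList (some i) none)) i with
      | some j => (idx, j)
      | none => csharp_skip_verbatim_string_py_alt lines (idx + 1) 0
  else ((lines.length : Int), 0)
termination_by ((lines.length : Int) - idx).toNat
decreasing_by omega

-- ===== PRECONDITION & SPEC =====
-- Pre_ restricts to A's natural domain of positions: a line index idx ≥ -len(lines) and a column i that is
-- nonnegative (or arbitrary when idx ≥ len(lines), where the loop never runs and i is never read).
-- Outside it A either raises IndexError (idx < -len(lines), or i < -len(lines[idx]) on the first line) or
-- relies on Python negative-index wraparound with i incremented back through 0, re-reading the line from its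
-- start — accidental behaviour B's clamped slice lines[idx][i:] does not reproduce.
def Pre_csharp_skip_verbatim_string_py (lines : List String) (idx : Int) (i : Int) : Prop :=
  -(lines.length : Int) ≤ idx ∧ (0 ≤ i ∨ (lines.length : Int) ≤ idx)
instance (lines : List String) (idx : Int) (i : Int) : Decidable (Pre_csharp_skip_verbatim_string_py lines idx i) := by unfold Pre_csharp_skip_verbatim_string_py; infer_instance

def pvWitness_csharp_skip_verbatim_string_py : List String × Int × Int := (["abc", "de\"f"], 0, 1)

def Spec_csharp_skip_verbatim_string_py (lines : List String) (idx : Int) (i : Int) (out : Int × Int) : Prop := out = csharp_skip_verbatim_string_py_alt lines idx i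
instance (lines : List String) (idx : Int) (i : Int) (out : Int × Int) : Decidable (Spec_csharp_skip_verbatim_string_py lines idx i out) := by unfold Spec_csharp_skip_verbatim_string_py; infer_instance

-- ===== CLAIM (what is proved, stated in full; the proofs are below) =====
def Claim_equal_csharp_skip_verbatim_string_py : Prop := ∀ (lines : List String) (idx : Int) (i : Int), Dom_csharp_skip_verbatim_string_py lines idx i → Pre_csharp_skip_verbatim_string_py lines idx i → Spec_csharp_skip_verbatim_string_py lines idx i (csharp_skip_verbatim_string_py lines idx i)

-- ===== LEMMAS AND PROOFS =====

lemma pvRle_nil : pvRle [] = [] := by rw [pvRle.eq_def]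

lemma pvScan_congr_pos (l : List (Char × Nat)) {p q : Int} (h : p = q) : pvScan l p = pvScan l q := by
  rw [h]

lemma pvRle_cons (c : Char) (t : List Char) :
    pvRle (c :: t) = (c, pvSpan c t + 1) :: pvRle (t.drop (pvSpan c t)) := by rw [pvRle.eq_def]

-- skipping one non-quote character on the scan side
lemma pv_scan_cons_skip (c : Char) (hc : c ≠ '"') (t : List Char) (pos : Int) :
    pvScan (pvRle (c :: t)) pos = pvScan (pvRle t) (pos + 1) := by
  cases t with
  | nil => simp [pvRle_cons, pvRle_nil, pvSpan, pvScan, hc]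
  | cons a t2 =>
    by_cases ha : a = c
    · subst ha
      have hsp : pvSpan a (a :: t2) = pvSpan a t2 + 1 := by simp [pvSpan]
      rw [pvRle_cons, pvRle_cons, hsp]
      simp only [List.drop_succ_cons]
      rw [pvScan, pvScan, if_neg (by simp [hc]), if_neg (by simp [hc])]
      exact pvScan_congr_pos _ (by omega)
    · have hsp : pvSpan c (a :: t2) = 0 := by simp [pvSpan, ha]
      rw [pvRle_cons, hsp]
      simp only [List.drop_zero]
      rw [pvScan, if_neg (by simp [hc])]
      norm_num

-- skipping an escaped quote pair on the scan side
lemma pv_scan_quote_quote (t : List Char) (pos : Int) :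
    pvScan (pvRle ('"' :: '"' :: t)) pos = pvScan (pvRle t) (pos + 2) := by
  cases t with
  | nil =>
    rw [pvRle_cons]
    norm_num [pvSpan, pvScan, pvRle_nil]
  | cons b t3 =>
    by_cases hb : b = '"'
    · subst hb
      have hsp : pvSpan '"' ('"' :: '"' :: t3) = pvSpan '"' t3 + 2 := by simp [pvSpan]
      rw [pvRle_cons, hsp]
      simp only [List.drop_succ_cons]
      conv_rhs => rw [pvRle_cons]
      rw [pvScan, pvScan]
      have hpar : ((pvSpan '"' t3 + 2 + 1) % 2 = 1) ↔ ((pvSpan '"' t3 + 1) % 2 = 1) := by omega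
      by_cases hodd : (pvSpan '"' t3 + 1) % 2 = 1
      · rw [if_pos ⟨rfl, hpar.mpr hodd⟩, if_pos ⟨rfl, hodd⟩]
        simp only [Option.some.injEq]
        omega
      · rw [if_neg (by simp [hpar, hodd]), if_neg (by simp [hodd])]
        exact pvScan_congr_pos _ (by omega)
    · have hsp : pvSpan '"' ('"' :: b :: t3) = 1 := by simp [pvSpan, hb]
      rw [pvRle_cons, hsp]
      simp only [List.drop_succ_cons, List.drop_zero]
      rw [pvScan, if_neg (by simp)]
      exact pvScan_congr_pos _ (by omega)

-- a lone quote closes on the scan side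
lemma pv_scan_quote_close (t : List Char) (pos : Int) (h : ∀ b t3, t = b :: t3 → b ≠ '"') :
    pvScan (pvRle ('"' :: t)) pos = some (pos + 1) := by
  have hsp : pvSpan '"' t = 0 := by
    cases t with
    | nil => simp [pvSpan]
    | cons b t3 => simp [pvSpan, h b t3 rfl]
  rw [pvRle_cons, hsp]
  simp [pvScan]

-- A's inner loop computes the parity scan of the RLE of the tail.
lemma pv_inner_eq (s : List Char) (i : Int) (h0 : 0 ≤ i) :
    pvInnerA s i = pvScan (pvRle (s.drop i.toNat)) i := by
  generalize hm : ((s.length : Int) - i).toNat = m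
  induction m using Nat.strong_induction_on generalizing i with
  | _ m ih =>
  by_cases hlt : i < (s.length : Int)
  · have hilt : i.toNat < s.length := by omega
    have hdrop : s.drop i.toNat = s[i.toNat] :: s.drop (i.toNat + 1) := List.drop_eq_getElem_cons hilt
    have hget : PySem.List.pyGet? s i = some (s[i.toNat]) := by
      have hk : i = ((i.toNat : Nat) : Int) := by omega
      conv_lhs => rw [hk]
      rw [PySem.List.pyGet?_natCast]
      exact List.getElem?_eq_getElem hilt
    by_cases hc : s[i.toNat] = '"'
    · by_cases hnext : i + 1 < (s.length : Int) ∧ PySem.List.pyGet? s (i + 1) = some '"'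
      · have hilt2 : i.toNat + 1 < s.length := by omega
        have hget2 : s[i.toNat + 1] = '"' := by
          have hk : i + 1 = (((i.toNat + 1 : Nat) : Nat) : Int) := by omega
          have h2 := hnext.2
          rw [hk, PySem.List.pyGet?_natCast, List.getElem?_eq_getElem hilt2] at h2
          exact Option.some.inj h2
        have hdrop2 : s.drop (i.toNat + 1) = s[i.toNat + 1] :: s.drop (i.toNat + 2) :=
          List.drop_eq_getElem_cons hilt2
        rw [pvInnerA]
        rw [dif_pos hlt, hget]
        simp only [if_pos hc, if_pos hnext]
        rw [ih ((s.length : Int) - (i + 2)).toNat (by omega) (i + 2) (by omega) rfl]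
        rw [hdrop, hc, hdrop2, hget2]
        have h2 : (i + 2).toNat = i.toNat + 2 := by omega
        rw [h2, pv_scan_quote_quote]
      · rw [pvInnerA, dif_pos hlt, hget]
        simp only [if_pos hc, if_neg hnext]
        rw [hdrop, hc, pv_scan_quote_close]
        intro b t3 hbt hb
        apply hnext
        have hlen : i.toNat + 1 < s.length := by
          have := congrArg List.length hbt
          simp at this; omega
        refine ⟨by omega, ?_⟩
        have hk : i + 1 = (((i.toNat + 1 : Nat) : Nat) : Int) := by omega
        rw [hk, PySem.List.pyGet?_natCast, List.getElem?_eq_getElem hlen]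
        have hhead : s[i.toNat + 1] = b := by
          have h3 : s.drop (i.toNat + 1) = s[i.toNat + 1] :: s.drop (i.toNat + 2) :=
            List.drop_eq_getElem_cons hlen
          rw [hbt] at h3
          exact (List.cons.inj h3).1.symm
        rw [hhead, hb]
    · rw [pvInnerA, dif_pos hlt, hget]
      simp only [if_neg hc]
      rw [ih ((s.length : Int) - (i + 1)).toNat (by omega) (i + 1) (by omega) rfl]
      have h1 : (i + 1).toNat = i.toNat + 1 := by omega
      rw [h1, hdrop, pv_scan_cons_skip s[i.toNat] hc]
  · have hdrop : s.drop i.toNat = [] := List.drop_eq_nil_of_le (by omega)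
    rw [pvInnerA, dif_neg hlt, hdrop, pvRle_nil]
    rfl

lemma pv_outer_eq (lines : List String) (idx : Int) (i : Int) (h0 : 0 ≤ i) :
    csharp_skip_verbatim_string_py lines idx i = csharp_skip_verbatim_string_py_alt lines idx i := by
  generalize hm : ((lines.length : Int) - idx).toNat = m
  induction m using Nat.strong_induction_on generalizing idx i with
  | _ m ih =>
  rw [csharp_skip_verbatim_string_py, csharp_skip_verbatim_string_py_alt]
  by_cases h : idx < (lines.length : Int)
  · simp only [h, dif_pos]
    cases hget : PySem.List.pyGet? lines idx with
    | none => rfl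
    | some line =>
      dsimp only
      rw [pv_inner_eq line.toList i h0, PySem.List.slice_from _ h0]
      cases hinner : pvScan (pvRle (line.toList.drop i.toNat)) i with
      | some j => rfl
      | none =>
        dsimp only
        exact ih ((lines.length : Int) - (idx + 1)).toNat (by omega) (idx + 1) 0 (by omega) rfl
  · simp [h]

-- ===== VERDICT (by name: the statement is the Claim_ definition above) =====
theorem csharp_skip_verbatim_string_py_spec : Claim_equal_csharp_skip_verbatim_string_py := by
  intro lines idx i _ hpre
  unfold Spec_csharp_skip_verbatim_string_py
  rcases hpre.2 with hi | hidx
  · exact pv_outer_eq lines idx i hi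
  · rw [csharp_skip_verbatim_string_py, csharp_skip_verbatim_string_py_alt,
      dif_neg (by omega : ¬ idx < (lines.length : Int)),
      dif_neg (by omega : ¬ idx < (lines.length : Int))]
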